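-- pv_equiv track=rewrite | github.com/nishant-bhandigare/HackerRank-Practice | Algorithms/Happy Ladybugs.py | happyLadybugs
-- ===== SOURCE A (Python) =====
-- def happyLadybugs(b):
--     # Write your code here
--     record = {}
--     flag = True
--     for key in b:
--         if key not in record:
--             record[key] =1
--         else:
--             record[key]+=1
--
--     if "_" not in record.keys():
--         flag2 = True
--         for i in range(len(b)):
--             if (i > 0 and b[i] == b[i - 1]) or (i < len(b) - 1 and b[i] == b[i + 1]):
--                 continue
--             else:
--                 flag2 = False
--                 break
--
--         if flag2 is False:
--             return "NO"
--         else: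
--             return "YES"
--     else:
--         for key in record:
--             if record[key] == 1 and key != "_":
--                 flag = False
--                 break
--
--         if flag is True:
--             return "YES"
--         else:
--             return "NO"
-- ===== SOURCE B (Python) =====
-- def happyLadybugs(b):
--     if "_" in b:
--         counts = {}
--         for c in b:
--             counts[c] = counts.get(c, 0) + 1
--         return "YES" if all(v >= 2 for c, v in counts.items() if c != "_") else "NO"
--     # no free cell: happy iff every maximal run of equal colours already has length >= 2
--     runs = []
--     for c in b:
--         if runs and runs[-1][0] == c:
--             runs[-1][1] += 1
--         else:
--             runs.append([c, 1])
--     return "YES" if all(n >= 2 for _, n in runs) else "NO"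
-- ===== Notes on version B (the rewrite author's own statement) =====
-- stated objective: alternative
-- what changed: Replaces A's per-index neighbour test (b[i]==b[i-1] or b[i]==b[i+1]) with a run-length decomposition (every maximal run must have length >= 2) and replaces A's key loop with an all() over the counter's items.
import Mathlib
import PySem

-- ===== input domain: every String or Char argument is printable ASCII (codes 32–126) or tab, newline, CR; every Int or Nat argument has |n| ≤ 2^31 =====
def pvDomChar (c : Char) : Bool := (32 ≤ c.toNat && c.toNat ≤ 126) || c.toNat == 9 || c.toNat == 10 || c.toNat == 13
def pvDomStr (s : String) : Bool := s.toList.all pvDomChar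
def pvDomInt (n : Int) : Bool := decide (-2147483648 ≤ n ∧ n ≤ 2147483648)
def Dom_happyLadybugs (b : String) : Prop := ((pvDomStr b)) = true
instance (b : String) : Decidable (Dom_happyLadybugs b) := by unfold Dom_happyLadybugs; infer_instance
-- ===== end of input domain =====

-- B replaces A's per-index neighbour test with a run-length decomposition; equivalence is exact (both total).

-- ===== PORT A =====
-- counting loop of A: 'if key not in record: record[key]=1 else: record[key]+=1'
def pvCountA (l : List Char) : PySem.Dict Char Int :=
  l.foldl (fun d k => if d.contains k = false then d.insert k 1 else d.modify k 0 (· + 1))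
    PySem.Dict.empty

-- A's index loop with early break: flag2 becomes the Boolean result
def pvLoopA (l : List Char) (i : Nat) : Bool :=
  if i < l.length then
    if (decide (0 < i) && (l.getD i ' ' == l.getD (i - 1) ' '))
        || (decide (i < l.length - 1) && (l.getD i ' ' == l.getD (i + 1) ' ')) then
      pvLoopA l (i + 1)
    else false
  else true
termination_by l.length - i

-- A's key loop with early break: flag becomes the Boolean result
def pvLoopKeysA (d : PySem.Dict Char Int) : List Char → Bool
  | [] => true
  | k :: ks => if d.getD k 0 = 1 ∧ k ≠ '_' then false else pvLoopKeysA d ks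

def happyLadybugs (b : String) : String :=
  let l := b.toList
  let record := pvCountA l
  if record.contains '_' = false then
    if pvLoopA l 0 = false then "NO" else "YES"
  else
    if pvLoopKeysA record record.keys then "YES" else "NO"

-- ===== PORT B =====
-- runs[-1][1] += 1 on the run list
def pvBump : List (Char × Int) → List (Char × Int)
  | [] => []
  | [(c, n)] => [(c, n + 1)]
  | p :: ps => p :: pvBump ps

-- B's run-building loop: append a fresh run or extend the last one
def pvRunsB (l : List Char) : List (Char × Int) :=
  l.foldl (fun runs c =>
    if runs.getLast?.map Prod.fst = some c then pvBump runs
    else runs ++ [(c, 1)]) []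

def happyLadybugs_alt (b : String) : String :=
  let l := b.toList
  if l.contains '_' then
    let counts := l.foldl (fun d c => d.insert c (d.getD c 0 + 1))
      (PySem.Dict.empty : PySem.Dict Char Int)
    if (counts.items.filter (fun p => p.1 ≠ '_')).all (fun p => 2 ≤ p.2) then "YES" else "NO"
  else
    if (pvRunsB l).all (fun p => 2 ≤ p.2) then "YES" else "NO"

-- ===== PRECONDITION & SPEC =====
def Spec_happyLadybugs (b : String) (out : String) : Prop := out = happyLadybugs_alt b
instance (b : String) (out : String) : Decidable (Spec_happyLadybugs b out) := by unfold Spec_happyLadybugs; infer_instance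

-- ===== CLAIM (what is proved, stated in full; the proofs are below) =====
def Claim_equal_happyLadybugs : Prop := ∀ (b : String), Dom_happyLadybugs b → Spec_happyLadybugs b (happyLadybugs b)

-- ===== LEMMAS AND PROOFS =====

-- canonical run decomposition, used to relate pvLoopA and pvRunsB
def pvChunks : List Char → List (Char × Int)
  | [] => []
  | a :: rest =>
    (a, 1 + ((rest.takeWhile (· == a)).length : Int)) :: pvChunks (rest.dropWhile (· == a))
termination_by l => l.length
decreasing_by
  simp only [List.length_cons]
  exact Nat.lt_succ_of_le (List.length_dropWhile_le _ _)

-- structural version of A's neighbour condition, prev = previous character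
def pvCondAll : Option Char → List Char → Bool
  | _, [] => true
  | prev, [c] => prev == some c
  | prev, c :: d :: t => (prev == some c || c == d) && pvCondAll (some c) (d :: t)

theorem pvCountA_eq_counter (l : List Char) : pvCountA l = PySem.Dict.counter l := by
  rw [PySem.Dict.counter_eq_foldl, pvCountA]
  refine List.foldl_ext _ _ _ (fun d k _ => ?_)
  by_cases h : d.contains k = false
  · simp [h, PySem.Dict.modify, PySem.Dict.getD_of_not_contains d 0 h]
  · simp [h]

theorem pvLoopKeys_eq_all (d : PySem.Dict Char Int) (ks : List Char) :
    pvLoopKeysA d ks = ks.all (fun k => !(decide (d.getD k 0 = 1) && decide (k ≠ '_'))) := by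
  induction ks with
  | nil => rfl
  | cons k ks ih =>
    rw [pvLoopKeysA, List.all_cons]
    split_ifs with h
    · simp [h.1, h.2]
    · by_cases h1 : d.getD k 0 = 1
      · have h2 : ¬ k ≠ '_' := fun hk => h ⟨h1, hk⟩
        simp [h2, ih]
      · simp [h1, ih]

theorem pvBump_cons₂ (p q : Char × Int) (ps : List (Char × Int)) :
    pvBump (p :: q :: ps) = p :: pvBump (q :: ps) := rfl

theorem pvBump_append (xs ys : List (Char × Int)) (h : ys ≠ []) :
    pvBump (xs ++ ys) = xs ++ pvBump ys := by
  induction xs with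
  | nil => rfl
  | cons x xs ih =>
    cases hxy : xs ++ ys with
    | nil => exact absurd (List.append_eq_nil_iff.mp hxy).2 h
    | cons a t =>
      rw [List.cons_append, hxy, pvBump_cons₂, ← hxy, ih, List.cons_append]

theorem pvBump_ne_nil (ys : List (Char × Int)) (h : ys ≠ []) : pvBump ys ≠ [] := by
  cases ys with
  | nil => exact absurd rfl h
  | cons p ps => cases ps with
    | nil => obtain ⟨c, n⟩ := p; simp [pvBump]
    | cons q qs => rw [pvBump_cons₂]; simp

theorem pvRunsB_foldl_append (l : List Char) (xs ys : List (Char × Int)) (h : ys ≠ []) :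
    l.foldl (fun runs c =>
      if runs.getLast?.map Prod.fst = some c then pvBump runs else runs ++ [(c, 1)]) (xs ++ ys)
    = xs ++ l.foldl (fun runs c =>
      if runs.getLast?.map Prod.fst = some c then pvBump runs else runs ++ [(c, 1)]) ys := by
  induction l generalizing xs ys with
  | nil => simp
  | cons x t ih =>
    have hlast : (xs ++ ys).getLast? = ys.getLast? := by
      rw [List.getLast?_append]
      cases hys : ys.getLast? with
      | none => exact absurd (List.getLast?_eq_none_iff.mp hys) h
      | some a => rfl
    rw [List.foldl_cons, List.foldl_cons, hlast]
    split_ifs with hc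
    · rw [pvBump_append xs ys h, ih _ _ (pvBump_ne_nil ys h)]
    · rw [List.append_assoc, ih _ _ (by simp)]

theorem pvRunsB_open (l : List Char) (c : Char) (n : Int) :
    l.foldl (fun runs c =>
      if runs.getLast?.map Prod.fst = some c then pvBump runs else runs ++ [(c, 1)]) [(c, n)]
    = (c, n + ((l.takeWhile (· == c)).length : Int)) :: pvChunks (l.dropWhile (· == c)) := by
  induction l generalizing c n with
  | nil => simp [pvChunks]
  | cons x t ih =>
    rw [List.foldl_cons]
    by_cases hx : x = c
    · subst hx
      have hg : ([(x, n)].getLast?.map Prod.fst = some x) := by simp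
      rw [if_pos hg]
      show List.foldl _ [(x, n + 1)] t = _
      have h1 : (x :: t).takeWhile (· == x) = x :: t.takeWhile (· == x) := by simp
      have h2 : (x :: t).dropWhile (· == x) = t.dropWhile (· == x) := by simp
      rw [ih x (n + 1), h1, h2, List.length_cons]
      congr 2
      push_cast; ring
    · have hg : ¬ ([(c, n)].getLast?.map Prod.fst = some x) := by simp [Ne.symm hx]
      rw [if_neg hg]
      rw [pvRunsB_foldl_append t [(c, n)] [(x, 1)] (by simp), ih x 1]
      have ht : (x :: t).takeWhile (· == c) = [] := by simp [hx]
      have hd : (x :: t).dropWhile (· == c) = x :: t := by simp [hx]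
      rw [ht, hd, pvChunks]
      simp

theorem pvRunsB_eq_chunks (l : List Char) : pvRunsB l = pvChunks l := by
  cases l with
  | nil => simp [pvRunsB, pvChunks]
  | cons a rest =>
    rw [pvRunsB, List.foldl_cons, if_neg (by simp), List.nil_append, pvRunsB_open, pvChunks]

theorem pvCondAll_cons_self (c : Char) (t : List Char) :
    pvCondAll (some c) (c :: t) = pvCondAll (some c) t := by
  cases t with
  | nil => simp [pvCondAll]
  | cons d t' => simp [pvCondAll]

theorem pvCondAll_cons_ne (c d : Char) (t : List Char) (h : d ≠ c) :
    pvCondAll (some c) (d :: t) = pvCondAll none (d :: t) := by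
  have hcd : (c == d) = false := beq_eq_false_iff_ne.mpr (Ne.symm h)
  cases t with
  | nil => simp [pvCondAll, hcd]
  | cons e t' => simp [pvCondAll, hcd]

theorem pvAll_cons_ge (c : Char) (k : Int) (bs : List (Char × Int)) (hk : 2 ≤ k) :
    (((c, k) :: bs).all (fun p => decide (2 ≤ p.2))) = bs.all (fun p => decide (2 ≤ p.2)) := by
  simp [hk]

theorem pvCondAll_some (t : List Char) (a : Char) :
    pvCondAll (some a) t = (pvChunks (t.dropWhile (· == a))).all (fun p => 2 ≤ p.2) := by
  induction t generalizing a with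
  | nil => simp [pvCondAll, pvChunks]
  | cons x t' ih =>
    by_cases hx : x = a
    · subst hx
      rw [pvCondAll_cons_self, ih x]
      have hdw : (x :: t').dropWhile (· == x) = t'.dropWhile (· == x) := by simp
      rw [hdw]
    · rw [pvCondAll_cons_ne a x t' hx]
      have hd : (x :: t').dropWhile (· == a) = x :: t' := by simp [hx]
      rw [hd]
      cases t' with
      | nil => simp [pvCondAll, pvChunks]
      | cons y t'' =>
        by_cases hy : y = x
        · subst hy
          have h0 : pvCondAll none (y :: y :: t'')
              = ((none == some y || y == y) && pvCondAll (some y) (y :: t'')) := rfl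
          have hL : pvCondAll none (y :: y :: t'') = pvCondAll (some y) t'' := by
            rw [h0, pvCondAll_cons_self]; simp
          have h1 : (y :: t'').takeWhile (· == y) = y :: t''.takeWhile (· == y) := by simp
          have h3 : (y :: t'').dropWhile (· == y) = t''.dropWhile (· == y) := by simp
          rw [hL, ← pvCondAll_cons_self y t'', ih y, h3, pvChunks, h1, h3,
            pvAll_cons_ge _ _ _ (by rw [List.length_cons]; push_cast; omega)]
        · have hL : pvCondAll none (x :: y :: t'') = false := by
            simp [pvCondAll, Ne.symm hy]
          rw [hL, pvChunks]
          have h1 : (y :: t'').takeWhile (· == x) = [] := by simp [hy]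
          rw [h1]
          simp

theorem pvCondAll_none (l : List Char) :
    pvCondAll none l = (pvChunks l).all (fun p => 2 ≤ p.2) := by
  cases l with
  | nil => simp [pvCondAll, pvChunks]
  | cons a rest =>
    cases rest with
    | nil => simp [pvCondAll, pvChunks]
    | cons d t =>
      by_cases hd : d = a
      · subst hd
        have h0 : pvCondAll none (d :: d :: t)
            = ((none == some d || d == d) && pvCondAll (some d) (d :: t)) := rfl
        have hL : pvCondAll none (d :: d :: t) = pvCondAll (some d) t := by
          rw [h0, pvCondAll_cons_self]; simp
        have h1 : (d :: t).takeWhile (· == d) = d :: t.takeWhile (· == d) := by simp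
        have h3 : (d :: t).dropWhile (· == d) = t.dropWhile (· == d) := by simp
        rw [hL, pvCondAll_some t d, pvChunks, h1, h3,
          pvAll_cons_ge _ _ _ (by rw [List.length_cons]; push_cast; omega)]
      · have hL : pvCondAll none (a :: d :: t) = false := by
          simp [pvCondAll, Ne.symm hd]
        rw [hL, pvChunks]
        have h1 : (d :: t).takeWhile (· == a) = [] := by simp [hd]
        rw [h1]
        simp

theorem pvLoopA_inv (l : List Char) (i : Nat) :
    pvLoopA l i = pvCondAll (if i = 0 then none else some (l.getD (i - 1) ' ')) (l.drop i) := by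
  have hbc : ∀ x y : Char, (x == y) = (y == x) := by
    intro x y
    by_cases e : x = y
    · simp [e]
    · simp [e, Ne.symm e]
  have hde : ∀ x y : Char, decide (x = y) = (x == y) := by
    intro x y
    by_cases e : x = y <;> simp [e]
  rw [pvLoopA]
  by_cases h : i < l.length
  · rw [if_pos h]
    have hrec := pvLoopA_inv l (i + 1)
    simp only [Nat.add_sub_cancel, Nat.succ_ne_zero, reduceIte] at hrec
    have hgi : l.getD i ' ' = l[i] := List.getD_eq_getElem l ' ' h
    have hdrop : l.drop i = l[i] :: l.drop (i + 1) := (List.getElem_cons_drop h).symm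
    by_cases h2 : i + 1 < l.length
    · have hdrop2 : l.drop (i + 1) = l[i + 1] :: l.drop (i + 2) := (List.getElem_cons_drop h2).symm
      have hgi1 : l.getD (i + 1) ' ' = l[i + 1] := List.getD_eq_getElem l ' ' h2
      rw [hdrop]
      have hC : pvCondAll (if i = 0 then none else some (l.getD (i - 1) ' '))
            (l[i] :: l.drop (i + 1))
          = (((if i = 0 then none else some (l.getD (i - 1) ' ')) == some l[i]
              || l[i] == l.getD (i + 1) ' ')
             && pvCondAll (some l[i]) (l.drop (i + 1))) := by
        rw [hdrop2, hgi1]; rfl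
      rw [hC, ← hgi, ← hrec]
      have hlen : i < l.length - 1 := by omega
      have hcond : ((decide (0 < i) && (l.getD i ' ' == l.getD (i - 1) ' '))
            || (decide (i < l.length - 1) && (l.getD i ' ' == l.getD (i + 1) ' ')))
          = ((if i = 0 then none else some (l.getD (i - 1) ' ')) == some (l.getD i ' ')
              || (l.getD i ' ' == l.getD (i + 1) ' ')) := by
        by_cases h0 : i = 0
        · subst h0; simp [hlen]
        · simp [h0, Nat.pos_of_ne_zero h0, hlen, hbc]
      rw [hcond]
      cases hb : ((if i = 0 then none else some (l.getD (i - 1) ' ')) == some (l.getD i ' ')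
          || (l.getD i ' ' == l.getD (i + 1) ' ')) <;> simp
    · have hn : i + 1 = l.length := by omega
      have hdrop2 : l.drop (i + 1) = [] := List.drop_eq_nil_of_le (by omega)
      rw [hdrop, hdrop2]
      rw [hdrop2] at hrec
      have htrue : pvLoopA l (i + 1) = true := by rw [hrec]; rfl
      have hlen : ¬ (i < l.length - 1) := by omega
      have hsingle : pvCondAll (if i = 0 then none else some (l.getD (i - 1) ' ')) [l[i]]
          = ((if i = 0 then none else some (l.getD (i - 1) ' ')) == some l[i]) := rfl
      rw [hsingle, ← hgi, htrue]
      by_cases h0 : i = 0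
      · have hlen2 : ¬ 1 < l.length := by omega
        subst h0; simp [hlen, hlen2]
      · simp [h0, Nat.pos_of_ne_zero h0, hlen, hbc, hde]
  · rw [if_neg h]
    have hdrop : l.drop i = [] := List.drop_eq_nil_of_le (by omega)
    rw [hdrop]
    rfl
termination_by l.length - i
decreasing_by omega

theorem pvLoopA_eq_condAll (l : List Char) :
    pvLoopA l 0 = pvCondAll none l := by
  have h := pvLoopA_inv l 0
  simpa using h

theorem pvKeysBranch (l : List Char) :
    pvLoopKeysA (PySem.Dict.counter l) (PySem.Dict.counter l).keys
    = ((PySem.Dict.counter l).items.filter (fun p => p.1 ≠ '_')).all (fun p => 2 ≤ p.2) := by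
  rw [pvLoopKeys_eq_all, PySem.Dict.keys_counter, PySem.Dict.items_counter,
    Bool.eq_iff_iff, List.all_eq_true, List.all_eq_true]
  constructor
  · intro H p hp
    rw [List.mem_filter] at hp
    obtain ⟨k, hk, rfl⟩ := List.mem_map.mp hp.1
    have hc : 0 < l.count k := List.count_pos_iff.mpr ((PySem.Set.mem_ofList l k).mp hk)
    have h1 := H k hk
    have h2 := hp.2
    simp [PySem.Dict.getD_counter] at h1 h2 ⊢
    have h3 := h1.resolve_right h2
    omega
  · intro H k hk
    have hc : 0 < l.count k := List.count_pos_iff.mpr ((PySem.Set.mem_ofList l k).mp hk)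
    simp [PySem.Dict.getD_counter]
    by_cases hne : k = '_'
    · exact Or.inr hne
    · have hmem : (k, (l.count k : Int)) ∈
          ((PySem.Set.ofList l).map (fun k => (k, (l.count k : Int)))).filter
            (fun p => p.1 ≠ '_') :=
        List.mem_filter.mpr ⟨List.mem_map.mpr ⟨k, hk, rfl⟩, by simp [hne]⟩
      have h2 := H _ hmem
      simp at h2
      exact Or.inl (by omega)

-- ===== VERDICT (by name: the statement is the Claim_ definition above) =====
theorem happyLadybugs_spec : Claim_equal_happyLadybugs := by
  unfold Claim_equal_happyLadybugs Spec_happyLadybugs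
  intro b _
  simp only [happyLadybugs, happyLadybugs_alt]
  rw [pvCountA_eq_counter, PySem.Dict.contains_counter,
    PySem.Dict.foldl_insert_getD_add_one_eq_counter]
  cases hc : b.toList.contains '_' with
  | false =>
    simp only [reduceIte, Bool.false_eq_true, if_false]
    have hA : pvLoopA b.toList 0 = (pvRunsB b.toList).all (fun p => 2 ≤ p.2) := by
      rw [pvLoopA_eq_condAll, pvCondAll_none, pvRunsB_eq_chunks]
    rw [hA]
    cases hall : (pvRunsB b.toList).all (fun p => 2 ≤ p.2) <;> simp
  | true =>
    rw [pvKeysBranch]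
    simp
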